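-- pv_equiv track=rewrite | github.com/AbstractEndeavors/ReadWriteContracts | guiNetAndAsk.py | isAnyFloat
-- ===== SOURCE A (Python) =====
-- def isFloat(k):
--     if type(k) is float:
--         return True
--
-- def isAnyFloat(k):
--     if isFloat(k):
--         return True
--     if isStr(k) == False:
--         k = str(k)
--     spl = k.split('.')
--     if len(spl) != 2:
--         return False
--     for i in range(0,len(spl)):
--         if ifAllInts(spl[i]) == False:
--             return False
--     return True
--
-- def isStr(x):
--     if type(x) is str:
--         return True
--     return False
--
-- def ifAllInts(x):
--     lsN,ints = [],getAllInts()
--     if isStr(x) == False: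
--         x = str(x)
--     for i in range(0,len(x)):
--         if x[i] not in ints:
--             return False
--     return True
--
-- def getAllInts():
--     return str('0,1,2,3,4,5,6,7,8,9').split(',')
-- ===== SOURCE B (Python) =====
-- import re
--
-- _FLOAT_RE = re.compile(r'[0-9]*\.[0-9]*')
--
-- def isAnyFloat(k):
--     if type(k) is float:
--         return True
--     s = k if type(k) is str else str(k)
--     return _FLOAT_RE.fullmatch(s) is not None
-- ===== Notes on version B (the rewrite author's own statement) =====
-- stated objective: simpler
-- what changed: Replaces the split-into-two-parts plus per-character digit-list membership loop (and the ifAllInts/getAllInts helpers) by a single anchored regex fullmatch of [0-9]*\.[0-9]* over the whole string.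
import Mathlib
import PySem

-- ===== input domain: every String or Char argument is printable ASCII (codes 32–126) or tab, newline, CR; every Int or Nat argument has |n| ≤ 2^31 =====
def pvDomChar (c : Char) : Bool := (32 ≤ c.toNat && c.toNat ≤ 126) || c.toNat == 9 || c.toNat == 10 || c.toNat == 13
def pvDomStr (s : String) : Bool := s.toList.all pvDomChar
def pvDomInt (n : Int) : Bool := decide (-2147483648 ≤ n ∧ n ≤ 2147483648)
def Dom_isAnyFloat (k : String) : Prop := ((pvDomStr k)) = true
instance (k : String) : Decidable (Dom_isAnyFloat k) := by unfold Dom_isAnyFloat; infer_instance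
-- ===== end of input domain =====

-- B replaces A's split-into-two-parts + per-character digit-list membership (and its helpers)
-- by one anchored whole-string match of the pattern [0-9]*\.[0-9]* ; objective: simpler.
-- (k : String, so the `type(k) is float` / str(k) branches of both Pythons are dead here.)

-- ===== PORT A =====
-- getAllInts(): '0,1,2,3,4,5,6,7,8,9'.split(',')
def getAllInts : List String :=
  (PySem.Str.split? "0,1,2,3,4,5,6,7,8,9" ",").getD []

-- ifAllInts(x): every character (as a 1-char string) is in the digits list
def ifAllInts (x : String) : Bool :=
  let ints := getAllInts
  x.toList.all (fun c => ints.contains (String.ofList [c]))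

def isAnyFloat (k : String) : Bool :=
  -- isFloat(k) is None for a str; isStr(k) is True so k stays unchanged
  let spl := (PySem.Str.split? k ".").getD []
  if spl.length ≠ 2 then false
  else spl.all (fun p => ifAllInts p)

-- ===== PORT B =====
-- B's regex [0-9]*\.[0-9]* fullmatch, transcribed as its two-state scanner:
-- before the dot accept digits, at the dot switch, after it all chars must be digits.
def isDig (c : Char) : Bool := '0' ≤ c && c ≤ '9'

def matchFloat : List Char → Bool
  | [] => false
  | c :: rest =>
    if c = '.' then rest.all isDig
    else if isDig c then matchFloat rest
    else false

def isAnyFloat_alt (k : String) : Bool := matchFloat k.toList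

-- ===== PRECONDITION & SPEC =====
def Spec_isAnyFloat (k : String) (out : Bool) : Prop := out = isAnyFloat_alt k
instance (k : String) (out : Bool) : Decidable (Spec_isAnyFloat k out) := by unfold Spec_isAnyFloat; infer_instance

-- ===== CLAIM (what is proved, stated in full; the proofs are below) =====
def Claim_equal_isAnyFloat : Prop := ∀ (k : String), Dom_isAnyFloat k → Spec_isAnyFloat k (isAnyFloat k)

-- ===== LEMMAS AND PROOFS =====

-- functional view of PySem.Chars.splitOn.go for the single-char separator '.'
def splitF : List Char → List Char → List (List Char)
  | [], cur => [cur.reverse]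
  | c :: rest, cur =>
    if c = '.' then cur.reverse :: splitF rest []
    else splitF rest (c :: cur)

theorem splitF_ne_nil (l cur : List Char) : splitF l cur ≠ [] := by
  induction l generalizing cur with
  | nil => simp [splitF]
  | cons c rest ih => simp only [splitF]; split <;> simp [ih]

theorem go_eq_splitF (l : List Char) : ∀ (fuel : Nat) (cur : List Char) (acc : List (List Char)),
    l.length ≤ fuel →
    PySem.Chars.splitOn.go ['.'] fuel l cur acc = acc.reverse ++ splitF l cur := by
  induction l with
  | nil =>
    intro fuel cur acc _
    cases fuel <;> simp [PySem.Chars.splitOn.go, splitF]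
  | cons c rest ih =>
    intro fuel cur acc hf
    cases fuel with
    | zero => simp at hf
    | succ n =>
      simp only [List.length_cons, Nat.succ_le_succ_iff] at hf
      by_cases hc : c = '.'
      · subst hc
        simp [PySem.Chars.splitOn.go, List.isPrefixOf, splitF, ih n [] (cur.reverse :: acc) hf]
      · have hpre : List.isPrefixOf ['.'] (c :: rest) = false := by
          simp [List.isPrefixOf]; exact fun h => absurd h.symm hc
        simp [PySem.Chars.splitOn.go, hpre, splitF, hc, ih n (c :: cur) acc hf]

theorem splitOn_eq_splitF (l : List Char) :
    PySem.Chars.splitOn l ['.'] = splitF l [] := by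
  unfold PySem.Chars.splitOn
  rw [go_eq_splitF l (l.length + 1) [] [] (by omega)]
  simp

-- A's per-character test agrees with B's [0-9] test
theorem digA_eq (c : Char) :
    (getAllInts.contains (String.ofList [c])) = isDig c := by
  have hg : getAllInts = [String.ofList ['0'], String.ofList ['1'], String.ofList ['2'],
      String.ofList ['3'], String.ofList ['4'], String.ofList ['5'], String.ofList ['6'],
      String.ofList ['7'], String.ofList ['8'], String.ofList ['9']] := by decide
  rw [hg]
  simp only [List.contains_cons, List.contains_nil, Bool.or_false]
  have h1 : ∀ d : Char, (String.ofList [c] == String.ofList [d]) = decide (c = d) := by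
    intro d
    by_cases h : c = d
    · subst h; simp
    · have hne : String.ofList [c] ≠ String.ofList [d] := fun he => h (by
        have := congrArg String.toList he; simpa using this)
      simp [h, hne]
  simp only [h1]
  have hiff : ((c = '0') ∨ (c = '1') ∨ (c = '2') ∨ (c = '3') ∨ (c = '4') ∨ (c = '5') ∨
      (c = '6') ∨ (c = '7') ∨ (c = '8') ∨ (c = '9')) ↔ ('0' ≤ c ∧ c ≤ '9') := by
    have hc : ∀ d : Char, (c = d) ↔ (c.toNat = d.toNat) := by
      intro d
      rw [Char.ext_iff, ← UInt32.toNat_inj]; rfl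
    have hle1 : ('0' ≤ c) ↔ (48 ≤ c.toNat) := by
      rw [Char.le_def, UInt32.le_iff_toNat_le]; rfl
    have hle2 : (c ≤ '9') ↔ (c.toNat ≤ 57) := by
      rw [Char.le_def, UInt32.le_iff_toNat_le]; rfl
    simp only [hc, hle1, hle2, show ('0':Char).toNat = 48 from rfl,
      show ('1':Char).toNat = 49 from rfl, show ('2':Char).toNat = 50 from rfl,
      show ('3':Char).toNat = 51 from rfl, show ('4':Char).toNat = 52 from rfl,
      show ('5':Char).toNat = 53 from rfl, show ('6':Char).toNat = 54 from rfl,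
      show ('7':Char).toNat = 55 from rfl, show ('8':Char).toNat = 56 from rfl,
      show ('9':Char).toNat = 57 from rfl]
    omega
  simp only [isDig, ← Bool.decide_and, ← Bool.decide_or]
  exact decide_eq_decide.mpr hiff

theorem ifAllInts_eq (p : List Char) :
    ifAllInts (String.ofList p) = p.all isDig := by
  unfold ifAllInts
  simp only [String.toList_ofList]
  exact List.all_congr rfl (fun c => digA_eq c)

-- one-part check: splitF has one all-digit part iff cur and l are all digits (and l has no dot)
theorem splitF_one (l : List Char) : ∀ (cur : List Char),
    (((splitF l cur).length == 1) && (splitF l cur).all (List.all · isDig))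
      = (cur.all isDig && l.all isDig) := by
  induction l with
  | nil => intro cur; simp [splitF, List.all_reverse]
  | cons c rest ih =>
    intro cur
    by_cases hc : c = '.'
    · subst hc
      have hne := splitF_ne_nil rest []
      have hlen : (splitF rest []).length ≠ 0 := by simpa using hne
      have hd : isDig '.' = false := by decide
      have h1 : ((splitF rest []).length + 1 == 1) = false := by
        simp; omega
      simp [splitF, hd, h1]
    · simp only [splitF, if_neg hc, ih (c :: cur), List.all_cons]
      cases h : isDig c <;> simp

-- the main invariant: A's check on splitF l cur equals cur-digits && matchFloat l
theorem splitF_main (l : List Char) : ∀ (cur : List Char),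
    (if (splitF l cur).length ≠ 2 then false
     else (splitF l cur).all (List.all · isDig))
      = (cur.all isDig && matchFloat l) := by
  induction l with
  | nil => intro cur; simp [splitF, matchFloat]
  | cons c rest ih =>
    intro cur
    by_cases hc : c = '.'
    · subst hc
      have hone := splitF_one rest []
      simp only [List.all_nil, Bool.true_and] at hone
      simp only [splitF, matchFloat, if_true, List.length_cons]
      by_cases h2 : (splitF rest []).length = 1
      · have h3 : ¬ ((splitF rest []).length + 1 ≠ 2) := by omega
        rw [if_neg h3]
        have hx : (splitF rest []).all (List.all · isDig) = rest.all isDig := by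
          rw [h2] at hone; simpa using hone
        simp [List.all_reverse, hx]
      · have h3 : (splitF rest []).length + 1 ≠ 2 := by omega
        rw [if_pos h3]
        have hx : rest.all isDig = false := by
          rw [← hone]; simp [h2]
        simp [hx]
    · simp only [splitF, if_neg hc, matchFloat, ih (c :: cur), List.all_cons]
      cases h : isDig c <;> simp [Bool.and_comm]

-- ===== VERDICT (by name: the statement is the Claim_ definition above) =====
theorem isAnyFloat_spec : Claim_equal_isAnyFloat := by
  intro k _
  unfold Spec_isAnyFloat isAnyFloat isAnyFloat_alt
  have hsplit : PySem.Str.split? k "." =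
      some ((PySem.Chars.splitOn k.toList ['.']).map String.ofList) := by
    simp [PySem.Str.split?, PySem.Chars.split?]
  rw [hsplit]
  simp only [Option.getD_some, splitOn_eq_splitF]
  have hall : ((splitF k.toList []).map String.ofList).all (fun p => ifAllInts p)
      = (splitF k.toList []).all (List.all · isDig) := by
    rw [List.all_map]
    exact List.all_congr rfl (fun p => ifAllInts_eq p)
  rw [List.length_map]
  by_cases hl : (splitF k.toList []).length ≠ 2
  · simp only [if_pos hl]
    have := splitF_main k.toList []
    simp only [if_pos hl, List.all_nil, Bool.true_and] at this
    exact this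
  · simp only [if_neg hl, hall]
    have := splitF_main k.toList []
    simp only [if_neg hl, List.all_nil, Bool.true_and] at this
    exact this
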